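-- pv_equiv track=rewrite | github.com/azagsam/cross-lingual-summarization | correct_with_rules.py | remove_repeating_n_grams
-- ===== SOURCE A (Python) =====
-- def remove_repeating_n_grams(text, n_gram=3):
--     if n_gram == 0:
--         return text
--     else:
--         corrected_text = []
--         for ind, word in enumerate(text):
--             current_ngram = corrected_text[-n_gram:]
--             next_ngram = text[ind:ind + n_gram]
--             if current_ngram == next_ngram:
--                 continue
--             else:
--                 corrected_text.append(word)
--         return remove_repeating_n_grams(corrected_text, n_gram - 1)
-- ===== SOURCE B (Python) =====
-- def remove_repeating_n_grams(text, n_gram=3):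
--     current = text
--     for n in range(n_gram, 0, -1):
--         corrected = []
--         for ind in range(len(current)):
--             if corrected[-n:] != current[ind:ind + n]:
--                 corrected.append(current[ind])
--         current = corrected
--     return current
-- ===== Notes on version B (the rewrite author's own statement) =====
-- stated objective: simpler
-- what changed: Replaces A's tail recursion over n_gram and its enumerate walk with an iterative countdown loop (for n in range(n_gram,0,-1)) containing a plain index loop, so no recursion and no RecursionError on negative n_gram.
import Mathlib
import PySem

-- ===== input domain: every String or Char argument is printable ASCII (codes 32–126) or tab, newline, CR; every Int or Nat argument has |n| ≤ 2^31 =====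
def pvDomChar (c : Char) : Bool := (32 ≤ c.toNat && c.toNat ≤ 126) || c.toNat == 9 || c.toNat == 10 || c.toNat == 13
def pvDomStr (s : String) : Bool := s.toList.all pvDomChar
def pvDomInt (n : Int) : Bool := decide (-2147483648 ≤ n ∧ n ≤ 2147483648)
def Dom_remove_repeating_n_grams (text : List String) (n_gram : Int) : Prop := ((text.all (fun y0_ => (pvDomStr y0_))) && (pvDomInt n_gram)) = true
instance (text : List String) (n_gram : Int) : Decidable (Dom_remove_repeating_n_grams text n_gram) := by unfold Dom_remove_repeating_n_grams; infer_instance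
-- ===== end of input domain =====

-- B replaces A's tail recursion over n_gram and its enumerate walk by a plain
-- iterative countdown loop with an index loop inside (objective: simpler/idiomatic;
-- same asymptotic cost). Return-value equivalence only; neither mutates its input.

-- ===== PORT A =====
-- one level of A's loop: the body of the for over enumerate(text)
def pvLevelA (n : Int) (text : List String) : List String :=
  (PySem.List.enumerate text).foldl
    (fun corrected_text p =>
      let current_ngram := PySem.List.slice corrected_text (some (-n)) none
      let next_ngram := PySem.List.slice text (some p.1) (some (p.1 + n))
      if current_ngram = next_ngram then corrected_text
      else corrected_text ++ [p.2]) []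

-- A's tail recursion, fuel = n_gram (A only terminates for n_gram ≥ 0)
def pvRecA : Nat → List String → List String
  | 0, text => text
  | k + 1, text => pvRecA k (pvLevelA ((k : Int) + 1) text)

def remove_repeating_n_grams (text : List String) (n_gram : Int) : List String :=
  if n_gram = 0 then text
  else if 0 < n_gram then pvRecA n_gram.toNat text
  else []  -- n_gram < 0: Python A recurses forever (RecursionError); excluded by Pre_

-- ===== PORT B =====
-- one pass of B's inner index loop (ind < len current, so the pyGetD default is never used)
def pvLevelB (n : Int) (current : List String) : List String :=
  (PySem.List.pyRange 0 (PySem.List.len current) 1).foldl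
    (fun corrected ind =>
      if PySem.List.slice corrected (some (-n)) none
         ≠ PySem.List.slice current (some ind) (some (ind + n))
      then corrected ++ [PySem.List.pyGetD current ind ""]
      else corrected) []

def remove_repeating_n_grams_alt (text : List String) (n_gram : Int) : List String :=
  (PySem.List.pyRange n_gram 0 (-1)).foldl (fun current n => pvLevelB n current) text

-- ===== PRECONDITION & SPEC =====
-- Pre_ excludes n_gram < 0, where Python A recurses without a base case and raises RecursionError (B returns text unchanged there).
def Pre_remove_repeating_n_grams (text : List String) (n_gram : Int) : Prop := 0 ≤ n_gram
instance (text : List String) (n_gram : Int) : Decidable (Pre_remove_repeating_n_grams text n_gram) := by unfold Pre_remove_repeating_n_grams; infer_instance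
def pvWitness_remove_repeating_n_grams : List String × Int := (["a", "a", "b"], 1)

def Spec_remove_repeating_n_grams (text : List String) (n_gram : Int) (out : List String) : Prop := out = remove_repeating_n_grams_alt text n_gram
instance (text : List String) (n_gram : Int) (out : List String) : Decidable (Spec_remove_repeating_n_grams text n_gram out) := by unfold Spec_remove_repeating_n_grams; infer_instance

-- ===== CLAIM (what is proved, stated in full; the proofs are below) =====
def Claim_equal_remove_repeating_n_grams : Prop := ∀ (text : List String) (n_gram : Int), Dom_remove_repeating_n_grams text n_gram → Pre_remove_repeating_n_grams text n_gram → Spec_remove_repeating_n_grams text n_gram (remove_repeating_n_grams text n_gram)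

-- ===== LEMMAS AND PROOFS =====

-- one level of A equals one pass of B
theorem pvLevelA_eq_pvLevelB (n : Int) (t : List String) : pvLevelA n t = pvLevelB n t := by
  unfold pvLevelA pvLevelB
  rw [PySem.List.enumerate_eq_map_pyRange (d := ""), List.foldl_map]
  simp [ite_not]

-- B's countdown fold over range(k, 0, -1) is A's fuel recursion
theorem pvFold_eq_pvRecA (k : Nat) (t : List String) :
    (PySem.List.pyRange (k : Int) 0 (-1)).foldl (fun current n => pvLevelB n current) t
      = pvRecA k t := by
  induction k generalizing t with
  | zero => rw [PySem.List.pyRange_neg_one_eq_nil (by omega)]; rfl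
  | succ k ih =>
      rw [PySem.List.pyRange_neg_one_cons (by exact_mod_cast Int.ofNat_lt.mpr (Nat.succ_pos k))]
      simp only [List.foldl_cons]
      rw [show ((k + 1 : Nat) : Int) - 1 = (k : Int) by push_cast; ring]
      rw [ih, ← pvLevelA_eq_pvLevelB]
      show pvRecA k (pvLevelA ((k + 1 : Nat) : Int) t) = pvRecA (k + 1) t
      rw [show ((k + 1 : Nat) : Int) = (k : Int) + 1 by push_cast; ring]
      rfl

-- ===== VERDICT (by name: the statement is the Claim_ definition above) =====
theorem remove_repeating_n_grams_spec : Claim_equal_remove_repeating_n_grams := by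
  intro text n_gram _ hpre
  unfold Pre_remove_repeating_n_grams at hpre
  unfold Spec_remove_repeating_n_grams remove_repeating_n_grams remove_repeating_n_grams_alt
  by_cases h0 : n_gram = 0
  · subst h0
    rw [PySem.List.pyRange_neg_one_eq_nil (by omega)]
    simp
  · rw [if_neg h0, if_pos (by omega)]
    rw [show n_gram = ((n_gram.toNat : Nat) : Int) from (Int.toNat_of_nonneg hpre).symm]
    exact (pvFold_eq_pvRecA n_gram.toNat text).symm
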